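-- pv_equiv track=rewrite | github.com/fanyuguang/word-segmentation | train-evaluate/deep-segment/utils/data_utils.py | judge_same_word
-- ===== SOURCE A (Python) =====
-- def judge_same_word(word, predict_word):
--     """
--     Judge two words is same
--     :param word:
--     :param predict_word:
--     :return: if same return True, else return False
--     """
--     word_matrix = [[0 for _ in range(len(predict_word) + 1)] for _ in range(len(word) + 1)]
--     common_max = 0
--     for i in range(len(word)):
--         for j in range(len(predict_word)):
--             if word[i] == predict_word[j]:
--                 word_matrix[i + 1][j + 1] = word_matrix[i][j] + 1
--                 if word_matrix[i + 1][j + 1] > common_max: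
--                     common_max = word_matrix[i + 1][j + 1]
--     min_len = len(word) if len(word) < len(predict_word) else len(predict_word)
--     if common_max >= 6 or common_max == min_len:
--         return True
--     else:
--         return False
-- ===== SOURCE B (Python) =====
-- def judge_same_word(word, predict_word):
--     """
--     Judge two words is same
--     :param word:
--     :param predict_word:
--     :return: if same return True, else return False
--     """
--     n = len(word)
--     m = len(predict_word)
--     if n < 6 or m < 6:
--         # short case: A's threshold can only be met by the whole shorter word
--         if n <= m:
--             return word in predict_word
--         else:
--             return predict_word in word
--     # long case: any common substring of length 6 suffices
--     windows = {word[i:i + 6] for i in range(n - 5)}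
--     return any(predict_word[j:j + 6] in windows for j in range(m - 5))
-- ===== Notes on version B (the rewrite author's own statement) =====
-- stated objective: faster
-- what changed: A fills an O(n*m) longest-common-substring DP table and takes its maximum; B never builds the table: if either word is shorter than 6 it does a direct substring-membership test of the shorter word in the longer, otherwise it hashes the length-6 windows of one word into a set and scans the other word's windows against it.
import Mathlib
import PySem

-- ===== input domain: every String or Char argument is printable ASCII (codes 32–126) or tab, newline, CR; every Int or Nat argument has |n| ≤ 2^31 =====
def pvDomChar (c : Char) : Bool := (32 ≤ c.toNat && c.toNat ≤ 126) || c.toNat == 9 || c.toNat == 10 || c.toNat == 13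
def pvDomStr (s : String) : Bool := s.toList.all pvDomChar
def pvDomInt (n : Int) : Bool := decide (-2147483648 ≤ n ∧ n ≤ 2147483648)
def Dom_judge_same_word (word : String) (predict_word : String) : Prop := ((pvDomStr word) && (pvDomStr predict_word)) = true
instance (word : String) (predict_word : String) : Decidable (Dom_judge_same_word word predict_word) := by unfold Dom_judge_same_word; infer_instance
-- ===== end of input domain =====

-- B replaces A's O(n*m) longest-common-substring DP table by a direct check: for short
-- inputs a substring-membership test, otherwise a set of the length-6 windows of one
-- string scanned against the windows of the other (objective: faster).

-- ===== PORT A =====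
def judge_same_word (word : String) (predict_word : String) : Bool :=
  let w := word.toList
  let p := predict_word.toList
  let word_matrix : List (List Int) :=
    (PySem.List.pyRange 0 (PySem.Str.len word + 1) 1).map (fun _ =>
      (PySem.List.pyRange 0 (PySem.Str.len predict_word + 1) 1).map (fun _ => (0 : Int)))
  let st :=
    (PySem.List.pyRange 0 (PySem.Str.len word) 1).foldl (fun st i =>
      (PySem.List.pyRange 0 (PySem.Str.len predict_word) 1).foldl (fun st j =>
        if PySem.List.pyGetD w i ' ' = PySem.List.pyGetD p j ' ' then
          let v := PySem.List.pyGetD (PySem.List.pyGetD st.1 i []) j 0 + 1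
          let mat := PySem.List.pySetD st.1 (i + 1)
            (PySem.List.pySetD (PySem.List.pyGetD st.1 (i + 1) []) (j + 1) v)
          if v > st.2 then (mat, v) else (mat, st.2)
        else st) st) (word_matrix, (0 : Int))
  let common_max := st.2
  let min_len :=
    if PySem.Str.len word < PySem.Str.len predict_word then PySem.Str.len word
    else PySem.Str.len predict_word
  if common_max ≥ 6 ∨ common_max = min_len then true else false

-- ===== PORT B =====
def judge_same_word_alt (word : String) (predict_word : String) : Bool :=
  let n := PySem.Str.len word
  let m := PySem.Str.len predict_word
  if n < 6 ∨ m < 6 then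
    if n ≤ m then PySem.Str.isIn word predict_word
    else PySem.Str.isIn predict_word word
  else
    let windows : PySem.Set String :=
      PySem.Set.ofList ((PySem.List.pyRange 0 (n - 5) 1).map (fun i =>
        PySem.Str.slice word (some i) (some (i + 6))))
    (PySem.List.pyRange 0 (m - 5) 1).any (fun j =>
      PySem.Set.contains windows (PySem.Str.slice predict_word (some j) (some (j + 6))))

-- ===== PRECONDITION & SPEC =====
def Spec_judge_same_word (word : String) (predict_word : String) (out : Bool) : Prop := out = judge_same_word_alt word predict_word
instance (word : String) (predict_word : String) (out : Bool) : Decidable (Spec_judge_same_word word predict_word out) := by unfold Spec_judge_same_word; infer_instance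

-- ===== CLAIM (what is proved, stated in full; the proofs are below) =====
def Claim_equal_judge_same_word : Prop := ∀ (word : String) (predict_word : String), Dom_judge_same_word word predict_word → Spec_judge_same_word word predict_word (judge_same_word word predict_word)

-- ===== LEMMAS AND PROOFS =====

-- longest common suffix length of w[:i] and p[:j] (the value A's DP cell (i,j) holds)
def lcsuf (w p : List Char) : Nat → Nat → Nat
  | 0, _ => 0
  | _ + 1, 0 => 0
  | i + 1, j + 1 =>
    if w.getD i ' ' = p.getD j ' ' then lcsuf w p i j + 1 else 0

-- running maximum of lcsuf over row a, columns 1..j, starting from acc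
def rowMax (w p : List Char) (a j : Nat) (acc : Nat) : Nat :=
  (List.range j).foldl (fun c t => Nat.max c (lcsuf w p a (t + 1))) acc

-- maximum of lcsuf over rows 1..i, columns 1..m
def allMax (w p : List Char) (m : Nat) : Nat → Nat
  | 0 => 0
  | i + 1 => rowMax w p (i + 1) m (allMax w p m i)

def pvG (w p : List Char) : Nat := allMax w p p.length w.length

def pvEntry (mat : List (List Int)) (a b : Nat) : Int := (mat.getD a []).getD b 0

-- the state invariant of A's nested loop: i rows fully processed plus j cells of row i+1
def StInv (w p : List Char) (i j : Nat) (st : List (List Int) × Int) : Prop :=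
  st.1.length = w.length + 1 ∧
  (∀ r ∈ st.1, r.length = p.length + 1) ∧
  (∀ a b : Nat,
    pvEntry st.1 a b =
      if 1 ≤ a ∧ 1 ≤ b ∧ a ≤ w.length ∧ b ≤ p.length ∧ (a ≤ i ∨ (a = i + 1 ∧ b ≤ j))
      then (lcsuf w p a b : Int) else 0) ∧
  st.2 = (rowMax w p (i + 1) j (allMax w p p.length i) : Int)

theorem lcsuf_ge_iff (w p : List Char) (k : Nat) : ∀ a b : Nat,
      (k ≤ lcsuf w p a b ↔ k ≤ a ∧ k ≤ b ∧ ∀ t < k, w.getD (a - 1 - t) ' ' = p.getD (b - 1 - t) ' ') := by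
  induction k with
  | zero => intro a b; simp
  | succ k ih =>
    intro a b
    match a, b with
    | 0, b => simp [lcsuf]
    | a + 1, 0 => simp [lcsuf]
    | a + 1, b + 1 =>
      by_cases hc : w.getD a ' ' = p.getD b ' '
      · have hstep : lcsuf w p (a + 1) (b + 1) = lcsuf w p a b + 1 := by
          rw [lcsuf]; rw [if_pos hc]
        rw [hstep]
        constructor
        · rintro h
          obtain ⟨h1, h2, h3⟩ := (ih a b).mp (by omega)
          refine ⟨by omega, by omega, ?_⟩
          intro t ht
          match t with
          | 0 => simpa using hc
          | t + 1 =>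
            have := h3 t (by omega)
            have e1 : a + 1 - 1 - (t + 1) = a - 1 - t := by omega
            have e2 : b + 1 - 1 - (t + 1) = b - 1 - t := by omega
            rw [e1, e2]; exact this
        · rintro ⟨h1, h2, h3⟩
          have : k ≤ lcsuf w p a b := by
            refine (ih a b).mpr ⟨by omega, by omega, ?_⟩
            intro t ht
            have := h3 (t + 1) (by omega)
            have e1 : a + 1 - 1 - (t + 1) = a - 1 - t := by omega
            have e2 : b + 1 - 1 - (t + 1) = b - 1 - t := by omega
            rw [e1, e2] at this; exact this
          omega
      · have hstep : lcsuf w p (a + 1) (b + 1) = 0 := by rw [lcsuf]; rw [if_neg hc]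
        rw [hstep]
        constructor
        · intro h; omega
        · rintro ⟨h1, h2, h3⟩
          exact absurd (by simpa using h3 0 (by omega)) hc

theorem lcsuf_zero_left (w p : List Char) (b : Nat) : lcsuf w p 0 b = 0 := by
  simp [lcsuf]

theorem lcsuf_zero_right (w p : List Char) (a : Nat) : lcsuf w p a 0 = 0 := by
  match a with
  | 0 => simp [lcsuf]
  | a + 1 => simp [lcsuf]

theorem rowMax_eq_foldl (w p : List Char) (a j : Nat) (acc : Nat) :
    rowMax w p a j acc = ((List.range j).map (fun t => lcsuf w p a (t + 1))).foldl max acc := by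
  rw [rowMax, List.foldl_map]

theorem le_rowMax (w p : List Char) (a j : Nat) (acc : Nat) :
    acc ≤ rowMax w p a j acc ∧ ∀ t < j, lcsuf w p a (t + 1) ≤ rowMax w p a j acc := by
  rw [rowMax_eq_foldl]
  obtain ⟨h1, h2⟩ := PySem.List.le_foldl_max ((List.range j).map (fun t => lcsuf w p a (t + 1))) acc
  refine ⟨h1, fun t ht => h2 _ ?_⟩
  exact List.mem_map_of_mem (by simpa using ht)

theorem rowMax_cases (w p : List Char) (a j : Nat) (acc : Nat) :
    rowMax w p a j acc = acc ∨ ∃ t < j, rowMax w p a j acc = lcsuf w p a (t + 1) := by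
  rw [rowMax_eq_foldl]
  rcases PySem.List.foldl_max_mem ((List.range j).map (fun t => lcsuf w p a (t + 1))) acc with h | h
  · exact Or.inl h
  · right
    obtain ⟨t, ht, he⟩ := List.mem_map.mp h
    exact ⟨t, by simpa using ht, he.symm⟩

theorem lcsuf_le_allMax (w p : List Char) (m : Nat) :
    ∀ i, ∀ a b : Nat, a ≤ i → b ≤ m → lcsuf w p a b ≤ allMax w p m i := by
  intro i
  induction i with
  | zero =>
    intro a b ha hb
    have : a = 0 := by omega
    simp [this, lcsuf_zero_left]
  | succ i ih =>
    intro a b ha hb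
    rw [allMax]
    by_cases hai : a ≤ i
    · exact le_trans (ih a b hai hb) (le_rowMax w p (i + 1) m _).1
    · have haeq : a = i + 1 := by omega
      subst haeq
      match b with
      | 0 => simp [lcsuf_zero_right]
      | b + 1 => exact (le_rowMax w p (i + 1) m _).2 b (by omega)

theorem le_pvG (w p : List Char) (a b : Nat) (ha : a ≤ w.length) (hb : b ≤ p.length) :
    lcsuf w p a b ≤ pvG w p :=
  lcsuf_le_allMax w p p.length w.length a b ha hb

theorem allMax_cases (w p : List Char) (m : Nat) :
    ∀ i, allMax w p m i = 0 ∨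
      ∃ a b, 1 ≤ a ∧ a ≤ i ∧ 1 ≤ b ∧ b ≤ m ∧ lcsuf w p a b = allMax w p m i := by
  intro i
  induction i with
  | zero => exact Or.inl rfl
  | succ i ih =>
    rw [allMax]
    rcases rowMax_cases w p (i + 1) m (allMax w p m i) with h | ⟨t, ht, he⟩
    · rw [h]
      rcases ih with h0 | ⟨a, b, h1, h2, h3, h4, h5⟩
      · exact Or.inl h0
      · exact Or.inr ⟨a, b, h1, by omega, h3, h4, h5⟩
    · exact Or.inr ⟨i + 1, t + 1, by omega, by omega, by omega, by omega, he.symm⟩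

theorem pvG_cases (w p : List Char) :
    pvG w p = 0 ∨ ∃ a b, 1 ≤ a ∧ a ≤ w.length ∧ 1 ≤ b ∧ b ≤ p.length ∧ lcsuf w p a b = pvG w p :=
  allMax_cases w p p.length w.length

theorem pvG_le_min (w p : List Char) : pvG w p ≤ min w.length p.length := by
  rcases pvG_cases w p with h | ⟨a, b, h1, h2, h3, h4, h5⟩
  · omega
  · obtain ⟨ha, hb, -⟩ := (lcsuf_ge_iff w p (lcsuf w p a b) a b).mp le_rfl
    omega

theorem pvG_ge_iff (w p : List Char) (k : Nat) (hk : 1 ≤ k) :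
    k ≤ pvG w p ↔ ∃ i j, i + k ≤ w.length ∧ j + k ≤ p.length ∧
      ∀ t < k, w.getD (i + t) ' ' = p.getD (j + t) ' ' := by
  constructor
  · intro hG
    rcases pvG_cases w p with h0 | ⟨a, b, h1, h2, h3, h4, h5⟩
    · omega
    · have hk' : k ≤ lcsuf w p a b := by omega
      obtain ⟨ha, hb, hpt⟩ := (lcsuf_ge_iff w p k a b).mp hk'
      refine ⟨a - k, b - k, by omega, by omega, ?_⟩
      intro t ht
      have := hpt (k - 1 - t) (by omega)
      have e1 : a - 1 - (k - 1 - t) = a - k + t := by omega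
      have e2 : b - 1 - (k - 1 - t) = b - k + t := by omega
      rw [e1, e2] at this
      exact this
  · rintro ⟨i, j, hi, hj, hpt⟩
    have hl : k ≤ lcsuf w p (i + k) (j + k) := by
      refine (lcsuf_ge_iff w p k (i + k) (j + k)).mpr ⟨by omega, by omega, ?_⟩
      intro t ht
      have := hpt (k - 1 - t) (by omega)
      have e1 : i + k - 1 - t = i + (k - 1 - t) := by omega
      have e2 : j + k - 1 - t = j + (k - 1 - t) := by omega
      rw [e1, e2]
      exact this
    exact le_trans hl (le_pvG w p (i + k) (j + k) (by omega) (by omega))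

-- the inner-loop body of A's port (definitionally the lambda inside judge_same_word)
def pvInner (w p : List Char) (i : Int) (st : List (List Int) × Int) (j : Int) :
    List (List Int) × Int :=
  if PySem.List.pyGetD w i ' ' = PySem.List.pyGetD p j ' ' then
    let v := PySem.List.pyGetD (PySem.List.pyGetD st.1 i []) j 0 + 1
    let mat := PySem.List.pySetD st.1 (i + 1)
      (PySem.List.pySetD (PySem.List.pyGetD st.1 (i + 1) []) (j + 1) v)
    if v > st.2 then (mat, v) else (mat, st.2)
  else st

def pvM0 (word predict_word : String) : List (List Int) :=
  (PySem.List.pyRange 0 (PySem.Str.len word + 1) 1).map (fun _ =>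
    (PySem.List.pyRange 0 (PySem.Str.len predict_word + 1) 1).map (fun _ => (0 : Int)))

theorem portA_foldl (word predict_word : String) :
    judge_same_word word predict_word =
      (let st := (PySem.List.pyRange 0 (PySem.Str.len word) 1).foldl
          (fun st i => (PySem.List.pyRange 0 (PySem.Str.len predict_word) 1).foldl
            (pvInner word.toList predict_word.toList i) st)
          (pvM0 word predict_word, (0 : Int))
       if st.2 ≥ 6 ∨ st.2 = (if PySem.Str.len word < PySem.Str.len predict_word
          then PySem.Str.len word else PySem.Str.len predict_word) then true else false) := rfl

theorem pvGetD_set {α : Type} (l : List α) (r : Nat) (x : α) (a : Nat) (d : α)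
    (hr : r < l.length) :
    (l.set r x).getD a d = if a = r then x else l.getD a d := by
  rcases eq_or_ne a r with rfl | hne
  · simp [List.getD_eq_getElem?_getD, hr]
  · simp [List.getD_eq_getElem?_getD, hne, Ne.symm hne]

theorem pvEntry_update (mat : List (List Int)) (r c : Nat) (v : Int)
    (hr : r < mat.length) (hc : c < (mat.getD r []).length) (a b : Nat) :
    pvEntry (mat.set r ((mat.getD r []).set c v)) a b =
      if a = r ∧ b = c then v else pvEntry mat a b := by
  unfold pvEntry
  rw [pvGetD_set _ _ _ _ _ hr]
  rcases eq_or_ne a r with rfl | hne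
  · rw [if_pos rfl, pvGetD_set _ _ _ _ _ hc]
    rcases eq_or_ne b c with rfl | hbe
    · simp
    · simp [hbe]
  · simp [hne]

theorem rowMax_succ (w p : List Char) (a j : Nat) (acc : Nat) :
    rowMax w p a (j + 1) acc = max (rowMax w p a j acc) (lcsuf w p a (j + 1)) := by
  rw [rowMax, rowMax, List.range_succ, List.foldl_append]
  rfl

theorem pvStep (w p : List Char) (i j : Nat) (st : List (List Int) × Int)
    (hi : i < w.length) (hj : j < p.length) (hst : StInv w p i j st) :
    StInv w p i (j + 1) (pvInner w p (i : Int) st (j : Int)) := by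
  obtain ⟨hlen, hrows, hent, hcm⟩ := hst
  have hci : ((i : Int) + 1) = ((i + 1 : Nat) : Int) := by push_cast; ring
  have hcj : ((j : Int) + 1) = ((j + 1 : Nat) : Int) := by push_cast; ring
  have hrowmem : st.1.getD (i + 1) [] ∈ st.1 := by
    have hlt : i + 1 < st.1.length := by omega
    rw [List.getD_eq_getElem _ _ hlt]
    exact List.getElem_mem _
  have hrowlen : (st.1.getD (i + 1) []).length = p.length + 1 := hrows _ hrowmem
  have hentij : (st.1.getD i []).getD j 0 = (lcsuf w p i j : Int) := by
    rw [show (st.1.getD i []).getD j 0 = pvEntry st.1 i j from rfl, hent i j]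
    by_cases h1 : 1 ≤ i ∧ 1 ≤ j
    · rw [if_pos ⟨h1.1, h1.2, by omega, by omega, Or.inl (by omega)⟩]
    · have hz : lcsuf w p i j = 0 := by
        match i, j with
        | 0, j => exact lcsuf_zero_left w p j
        | i + 1, 0 => exact lcsuf_zero_right w p (i + 1)
        | i + 1, j + 1 => exact absurd ⟨by omega, by omega⟩ h1
      rw [if_neg (by tauto), hz]
      simp
  have hpv : pvInner w p (i : Int) st (j : Int) =
      (if w.getD i ' ' = p.getD j ' ' then
        (if (lcsuf w p i j : Int) + 1 > st.2
         then (st.1.set (i + 1) ((st.1.getD (i + 1) []).set (j + 1) ((lcsuf w p i j : Int) + 1)),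
               (lcsuf w p i j : Int) + 1)
         else (st.1.set (i + 1) ((st.1.getD (i + 1) []).set (j + 1) ((lcsuf w p i j : Int) + 1)),
               st.2))
       else st) := by
    unfold pvInner
    rw [hci, hcj]
    simp only [PySem.List.pyGetD_natCast, PySem.List.pySetD_natCast, hentij]
  rw [hpv]
  by_cases hc : w.getD i ' ' = p.getD j ' '
  · rw [if_pos hc]
    have hv : lcsuf w p (i + 1) (j + 1) = lcsuf w p i j + 1 := by
      rw [lcsuf]; rw [if_pos hc]
    have hm1 : (st.1.set (i + 1) ((st.1.getD (i + 1) []).set (j + 1) ((lcsuf w p i j : Int) + 1))).length = w.length + 1 := by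
      simp [hlen]
    have hm2 : ∀ r ∈ st.1.set (i + 1) ((st.1.getD (i + 1) []).set (j + 1) ((lcsuf w p i j : Int) + 1)),
        r.length = p.length + 1 := by
      intro r hrmem
      rcases List.mem_or_eq_of_mem_set hrmem with hmem | rfl
      · exact hrows r hmem
      · rw [List.length_set]; exact hrowlen
    have hm3 : ∀ a b : Nat,
        pvEntry (st.1.set (i + 1) ((st.1.getD (i + 1) []).set (j + 1) ((lcsuf w p i j : Int) + 1))) a b =
          if 1 ≤ a ∧ 1 ≤ b ∧ a ≤ w.length ∧ b ≤ p.length ∧ (a ≤ i ∨ (a = i + 1 ∧ b ≤ j + 1))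
          then (lcsuf w p a b : Int) else 0 := by
      intro a b
      rw [pvEntry_update st.1 (i + 1) (j + 1) _ (by omega) (by omega) a b]
      by_cases hab : a = i + 1 ∧ b = j + 1
      · obtain ⟨rfl, rfl⟩ := hab
        rw [if_pos ⟨rfl, rfl⟩,
          if_pos ⟨by omega, by omega, by omega, by omega, Or.inr ⟨rfl, le_rfl⟩⟩, hv]
        push_cast
        ring
      · rw [if_neg hab, hent a b]
        rw [if_congr (show (1 ≤ a ∧ 1 ≤ b ∧ a ≤ w.length ∧ b ≤ p.length ∧ (a ≤ i ∨ (a = i + 1 ∧ b ≤ j))) ↔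
          (1 ≤ a ∧ 1 ≤ b ∧ a ≤ w.length ∧ b ≤ p.length ∧ (a ≤ i ∨ (a = i + 1 ∧ b ≤ j + 1))) by omega) rfl rfl]
    by_cases hgt : (lcsuf w p i j : Int) + 1 > st.2
    · rw [if_pos hgt]
      refine ⟨hm1, hm2, hm3, ?_⟩
      simp only
      rw [hcm] at hgt
      rw [rowMax_succ, hv]
      push_cast at hgt ⊢
      omega
    · rw [if_neg hgt]
      refine ⟨hm1, hm2, hm3, ?_⟩
      simp only
      rw [hcm] at hgt ⊢
      rw [rowMax_succ, hv]
      push_cast at hgt ⊢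
      omega
  · rw [if_neg hc]
    have hv0 : lcsuf w p (i + 1) (j + 1) = 0 := by
      rw [lcsuf]; rw [if_neg hc]
    refine ⟨hlen, hrows, ?_, ?_⟩
    · intro a b
      rw [hent a b]
      by_cases hab : a = i + 1 ∧ b = j + 1
      · obtain ⟨rfl, rfl⟩ := hab
        rw [if_neg (by omega),
          if_pos ⟨by omega, by omega, by omega, by omega, Or.inr ⟨rfl, le_rfl⟩⟩, hv0]
        simp
      · rw [if_congr (show (1 ≤ a ∧ 1 ≤ b ∧ a ≤ w.length ∧ b ≤ p.length ∧ (a ≤ i ∨ (a = i + 1 ∧ b ≤ j))) ↔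
          (1 ≤ a ∧ 1 ≤ b ∧ a ≤ w.length ∧ b ≤ p.length ∧ (a ≤ i ∨ (a = i + 1 ∧ b ≤ j + 1))) by omega) rfl rfl]
    · rw [hcm, rowMax_succ, hv0]
      simp

theorem pvInnerLoop (w p : List Char) (i : Nat) (hi : i < w.length) :
    ∀ (jc : Nat), jc ≤ p.length → ∀ st, StInv w p i 0 st →
      StInv w p i jc ((PySem.List.pyRange 0 (jc : Int) 1).foldl (pvInner w p (i : Int)) st) := by
  intro jc
  induction jc with
  | zero =>
    intro _ st hst
    rw [PySem.List.pyRange_one_eq_nil (by omega)]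
    exact hst
  | succ jc ih =>
    intro hjc st hst
    have hcast : ((jc + 1 : Nat) : Int) = (jc : Int) + 1 := by push_cast; ring
    rw [hcast, PySem.List.pyRange_one_succ_right (by positivity), List.foldl_append]
    exact pvStep w p i jc _ hi (by omega) (ih (by omega) st hst)

theorem pvRowShift (w p : List Char) (i : Nat) (st : List (List Int) × Int)
    (hst : StInv w p i p.length st) : StInv w p (i + 1) 0 st := by
  obtain ⟨h1, h2, h3, h4⟩ := hst
  refine ⟨h1, h2, ?_, ?_⟩
  · intro a b
    rw [h3 a b, if_congr (show (1 ≤ a ∧ 1 ≤ b ∧ a ≤ w.length ∧ b ≤ p.length ∧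
        (a ≤ i ∨ (a = i + 1 ∧ b ≤ p.length))) ↔
      (1 ≤ a ∧ 1 ≤ b ∧ a ≤ w.length ∧ b ≤ p.length ∧
        (a ≤ i + 1 ∨ (a = i + 1 + 1 ∧ b ≤ 0))) by omega) rfl rfl]
  · rw [h4]
    rw [allMax]
    rfl

theorem pvM0_inv (word predict_word : String) :
    StInv word.toList predict_word.toList 0 0 (pvM0 word predict_word, (0 : Int)) := by
  have hrow0 : ∀ (b : Nat),
      (((PySem.List.pyRange 0 (PySem.Str.len predict_word + 1) 1).map
        (fun _ => (0 : Int))).getD b 0) = 0 := by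
    intro b
    rcases h : ((PySem.List.pyRange 0 (PySem.Str.len predict_word + 1) 1).map
        (fun _ => (0 : Int)))[b]? with _ | x
    · simp [List.getD_eq_getElem?_getD]
    · have hx : x = 0 := by
        have := List.mem_of_getElem? h
        simp at this
        exact this
      simp [List.getD_eq_getElem?_getD]
  refine ⟨?_, ?_, ?_, ?_⟩
  · simp [pvM0, PySem.List.length_pyRange_one, PySem.Str.len_eq]
  · intro r hr
    simp only [pvM0] at hr
    obtain ⟨_, _, rfl⟩ := List.mem_map.mp hr
    simp [PySem.List.length_pyRange_one, PySem.Str.len_eq]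
  · intro a b
    rw [if_neg (by omega)]
    show pvEntry (pvM0 word predict_word) a b = 0
    unfold pvEntry pvM0
    by_cases ha : a < ((PySem.List.pyRange 0 (PySem.Str.len word + 1) 1).map
        (fun _ => (PySem.List.pyRange 0 (PySem.Str.len predict_word + 1) 1).map
          (fun _ => (0 : Int)))).length
    · rw [List.getD_eq_getElem _ _ ha]
      simp only [List.getElem_map]
      exact hrow0 b
    · have h0 : ((PySem.List.pyRange 0 (PySem.Str.len word + 1) 1).map
          (fun _ => (PySem.List.pyRange 0 (PySem.Str.len predict_word + 1) 1).map
            (fun _ => (0 : Int)))).getD a [] = ([] : List Int) := by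
        apply List.getD_eq_default
        omega
      rw [h0]
      rfl
  · simp [rowMax, allMax]

theorem pvOuterLoop (word predict_word : String) :
    ∀ (ic : Nat), ic ≤ word.toList.length →
      StInv word.toList predict_word.toList ic 0
        ((PySem.List.pyRange 0 (ic : Int) 1).foldl
          (fun st i => (PySem.List.pyRange 0 (PySem.Str.len predict_word) 1).foldl
            (pvInner word.toList predict_word.toList i) st)
          (pvM0 word predict_word, (0 : Int))) := by
  intro ic
  induction ic with
  | zero =>
    intro _
    rw [show PySem.List.pyRange 0 ((0 : Nat) : Int) 1 = [] from
      PySem.List.pyRange_one_eq_nil (by omega)]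
    exact pvM0_inv word predict_word
  | succ ic ih =>
    intro hic
    have hcast : ((ic + 1 : Nat) : Int) = (ic : Int) + 1 := by push_cast; ring
    rw [hcast, PySem.List.pyRange_one_succ_right (by positivity), List.foldl_append]
    simp only [List.foldl_cons, List.foldl_nil]
    apply pvRowShift
    have hlen : PySem.Str.len predict_word = (predict_word.toList.length : Int) := by
      simp [PySem.Str.len_eq]
    rw [hlen]
    exact pvInnerLoop word.toList predict_word.toList ic (by omega)
      predict_word.toList.length le_rfl _ (ih (by omega))

theorem portA_eq (word predict_word : String) :
    judge_same_word word predict_word =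
      decide (6 ≤ pvG word.toList predict_word.toList ∨
        pvG word.toList predict_word.toList = min word.toList.length predict_word.toList.length) := by
  rw [portA_foldl]
  have hlenw : PySem.Str.len word = (word.toList.length : Int) := by simp [PySem.Str.len_eq]
  have hlenp : PySem.Str.len predict_word = (predict_word.toList.length : Int) := by
    simp [PySem.Str.len_eq]
  simp only [hlenw, hlenp]
  have hfin := pvOuterLoop word predict_word word.toList.length le_rfl
  simp only [hlenp] at hfin
  obtain ⟨-, -, -, hcm⟩ := hfin
  have hrm0 : rowMax word.toList predict_word.toList (word.toList.length + 1) 0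
      (allMax word.toList predict_word.toList predict_word.toList.length word.toList.length) =
      pvG word.toList predict_word.toList := rfl
  rw [hrm0] at hcm
  simp only [hcm]
  have hmin : (if (word.toList.length : Int) < (predict_word.toList.length : Int)
      then (word.toList.length : Int) else (predict_word.toList.length : Int)) =
      ((min word.toList.length predict_word.toList.length : Nat) : Int) := by
    split_ifs with h
    · have : min word.toList.length predict_word.toList.length = word.toList.length := by omega
      rw [this]
    · have : min word.toList.length predict_word.toList.length = predict_word.toList.length := by
        omega
      rw [this]
  rw [hmin]
  have hiff : (((pvG word.toList predict_word.toList : Int)) ≥ 6 ∨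
      ((pvG word.toList predict_word.toList : Int)) =
        ((min word.toList.length predict_word.toList.length : Nat) : Int)) ↔
      (6 ≤ pvG word.toList predict_word.toList ∨
        pvG word.toList predict_word.toList =
          min word.toList.length predict_word.toList.length) := by
    omega
  by_cases hc : (6 ≤ pvG word.toList predict_word.toList ∨
      pvG word.toList predict_word.toList = min word.toList.length predict_word.toList.length)
  · rw [if_pos (hiff.mpr hc)]
    simp only [true_eq_decide_iff]
    simpa [String.length_toList] using hc
  · rw [if_neg (fun hh => hc (hiff.mp hh))]
    simp only [false_eq_decide_iff]
    simpa [String.length_toList] using hc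

theorem pvSlice_eq_iff (xs ys : List Char) (i j k : Nat)
    (hik : i + k ≤ xs.length) (hjk : j + k ≤ ys.length) :
    ((xs.drop i).take k = (ys.drop j).take k) ↔
      ∀ t < k, xs.getD (i + t) ' ' = ys.getD (j + t) ' ' := by
  have lx : ((xs.drop i).take k).length = k := by simp; omega
  have ly : ((ys.drop j).take k).length = k := by simp; omega
  constructor
  · intro h t ht
    have h1 : ((xs.drop i).take k)[t]'(by omega) = ((ys.drop j).take k)[t]'(by omega) :=
      List.getElem_of_eq h _
    simp only [List.getElem_take, List.getElem_drop] at h1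
    rw [List.getD_eq_getElem xs ' ' (by omega), List.getD_eq_getElem ys ' ' (by omega)]
    convert h1 using 2
  · intro h
    apply List.ext_getElem (by rw [lx, ly])
    intro t h1 h2
    simp only [List.getElem_take, List.getElem_drop]
    have ht : t < k := by omega
    have := h t ht
    rw [List.getD_eq_getElem xs ' ' (by omega), List.getD_eq_getElem ys ' ' (by omega)] at this
    convert this using 2

theorem pvG_symm (w p : List Char) : pvG w p = pvG p w := by
  have key : ∀ w p : List Char, pvG w p ≤ pvG p w := by
    intro w p
    rcases Nat.eq_zero_or_pos (pvG w p) with h | h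
    · omega
    · obtain ⟨i, j, hi, hj, hpt⟩ := (pvG_ge_iff w p _ h).mp le_rfl
      exact (pvG_ge_iff p w _ h).mpr ⟨j, i, hj, hi, fun t ht => (hpt t ht).symm⟩
  exact le_antisymm (key w p) (key p w)

theorem pvG_eq_len_iff (w p : List Char) (h : w.length ≤ p.length) :
    (pvG w p = w.length ↔ PySem.Chars.isIn w p = true) := by
  rcases Nat.eq_zero_or_pos w.length with h0 | hpos
  · have hw : w = [] := List.eq_nil_of_length_eq_zero h0
    subst hw
    simp [PySem.Chars.isIn_nil]
    have := pvG_le_min [] p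
    simp at this
    omega
  · rw [← PySem.Chars.exists_prefix_drop_iff_isIn]
    have hle := pvG_le_min w p
    constructor
    · intro hG
      have hged : w.length ≤ pvG w p := by omega
      obtain ⟨i, j, hi, hj, hpt⟩ := (pvG_ge_iff w p w.length (by omega)).mp hged
      have hi0 : i = 0 := by omega
      subst hi0
      refine ⟨j, ?_⟩
      rw [List.prefix_iff_eq_take]
      have heq : (w.drop 0).take w.length = (p.drop j).take w.length :=
        (pvSlice_eq_iff w p 0 j w.length (by omega) (by omega)).mpr (by simpa using hpt)
      simpa using heq
    · rintro ⟨j, hpre⟩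
      rw [List.prefix_iff_eq_take] at hpre
      have hjlen : j + w.length ≤ p.length := by
        have := congrArg List.length hpre
        simp at this
        omega
      have hpt := (pvSlice_eq_iff w p 0 j w.length (by omega) hjlen).mp (by simpa using hpre)
      have hged : w.length ≤ pvG w p :=
        (pvG_ge_iff w p w.length (by omega)).mpr ⟨0, j, by omega, hjlen, by simpa using hpt⟩
      omega

theorem pvWindow (s : String) (i : Int) (h0 : 0 ≤ i) :
    (PySem.Str.slice s (some i) (some (i + 6))).toList = (s.toList.drop i.toNat).take 6 := by
  obtain ⟨k, rfl⟩ := Int.eq_ofNat_of_zero_le h0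
  have hc : ((k : Int) + 6) = ((k + 6 : Nat) : Int) := by push_cast; ring
  simp only [PySem.Str.toList_slice, PySem.Chars.slice_eq_listSlice]
  rw [hc, PySem.List.slice_natCast]
  simp

theorem portB_eq (word predict_word : String) :
    judge_same_word_alt word predict_word =
      decide (6 ≤ pvG word.toList predict_word.toList ∨
        pvG word.toList predict_word.toList = min word.toList.length predict_word.toList.length) := by
  have hle := pvG_le_min word.toList predict_word.toList
  unfold judge_same_word_alt
  simp only [PySem.Str.len_eq]
  by_cases hshort : ((word.toList.length : Int) < 6 ∨ (predict_word.toList.length : Int) < 6)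
  · rw [if_pos hshort]
    by_cases hnm : ((word.toList.length : Int) ≤ (predict_word.toList.length : Int))
    · rw [if_pos hnm]
      have hnm' : word.toList.length ≤ predict_word.toList.length := by exact_mod_cast hnm
      have hs' : word.toList.length < 6 ∨ predict_word.toList.length < 6 := by exact_mod_cast hshort
      have hn6 : word.toList.length < 6 := by omega
      have hmin : min word.toList.length predict_word.toList.length = word.toList.length := by omega
      rw [hmin]
      have hno6 : ¬ (6 ≤ pvG word.toList predict_word.toList) := by omega
      have hiff := pvG_eq_len_iff word.toList predict_word.toList hnm'
      by_cases hG : pvG word.toList predict_word.toList = word.toList.length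
      · have htrue := hiff.mp hG
        simp [PySem.Str.isIn_eq, htrue, hG]
      · have hfalse : PySem.Chars.isIn word.toList predict_word.toList = false :=
          Bool.eq_false_iff.mpr (fun hh => hG (hiff.mpr hh))
        simp [PySem.Str.isIn_eq, hfalse, hno6]
        simpa [String.length_toList] using hG
    · rw [if_neg hnm]
      have hnm' : predict_word.toList.length ≤ word.toList.length := by
        have : ¬ ((word.toList.length : Int) ≤ (predict_word.toList.length : Int)) := hnm
        omega
      have hm6 : predict_word.toList.length < 6 := by
        have hs' : word.toList.length < 6 ∨ predict_word.toList.length < 6 := by exact_mod_cast hshort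
        omega
      rw [pvG_symm] at hle ⊢
      have hmin : min word.toList.length predict_word.toList.length = predict_word.toList.length := by omega
      rw [hmin]
      have hno6 : ¬ (6 ≤ pvG predict_word.toList word.toList) := by omega
      have hiff := pvG_eq_len_iff predict_word.toList word.toList hnm'
      by_cases hG : pvG predict_word.toList word.toList = predict_word.toList.length
      · have htrue := hiff.mp hG
        simp [PySem.Str.isIn_eq, htrue, hG]
      · have hfalse : PySem.Chars.isIn predict_word.toList word.toList = false :=
          Bool.eq_false_iff.mpr (fun hh => hG (hiff.mpr hh))
        simp [PySem.Str.isIn_eq, hfalse, hno6]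
        simpa [String.length_toList] using hG
  · rw [if_neg hshort]
    rw [not_or] at hshort
    obtain ⟨hs1, hs2⟩ := hshort
    have h6n : 6 ≤ word.toList.length := by
      have : ¬ ((word.toList.length : Int) < 6) := hs1; omega
    have h6m : 6 ≤ predict_word.toList.length := by
      have : ¬ ((predict_word.toList.length : Int) < 6) := hs2; omega
    have hiff :
        (((PySem.List.pyRange 0 ((predict_word.toList.length : Int) - 5) 1).any fun j =>
            (PySem.Set.ofList
              (List.map (fun i => PySem.Str.slice word (some i) (some (i + 6)))
                (PySem.List.pyRange 0 ((word.toList.length : Int) - 5) 1))).contains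
              (PySem.Str.slice predict_word (some j) (some (j + 6)))) = true) ↔
          6 ≤ pvG word.toList predict_word.toList := by
      rw [List.any_eq_true]
      constructor
      · rintro ⟨j, hjmem, hcont⟩
        rw [PySem.List.mem_pyRange_one] at hjmem
        rw [PySem.Set.contains_iff, PySem.Set.mem_ofList] at hcont
        obtain ⟨i, himem, hei⟩ := List.mem_map.mp hcont
        rw [PySem.List.mem_pyRange_one] at himem
        have htl := congrArg String.toList hei
        rw [pvWindow word i himem.1, pvWindow predict_word j hjmem.1] at htl
        have hi6 : i.toNat + 6 ≤ word.toList.length := by omega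
        have hj6 : j.toNat + 6 ≤ predict_word.toList.length := by omega
        refine (pvG_ge_iff _ _ 6 (by omega)).mpr ⟨i.toNat, j.toNat, hi6, hj6, ?_⟩
        exact (pvSlice_eq_iff _ _ _ _ 6 hi6 hj6).mp htl
      · intro hG
        obtain ⟨i, j, hi6, hj6, hpt⟩ := (pvG_ge_iff _ _ 6 (by omega)).mp hG
        refine ⟨(j : Int), ?_, ?_⟩
        · rw [PySem.List.mem_pyRange_one]
          exact ⟨Int.natCast_nonneg j, by omega⟩
        · rw [PySem.Set.contains_iff, PySem.Set.mem_ofList]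
          refine List.mem_map.mpr ⟨(i : Int), ?_, ?_⟩
          · rw [PySem.List.mem_pyRange_one]
            exact ⟨Int.natCast_nonneg i, by omega⟩
          · apply String.toList_inj.mp
            rw [pvWindow word (i : Int) (Int.natCast_nonneg i),
              pvWindow predict_word (j : Int) (Int.natCast_nonneg j)]
            simp only [Int.toNat_natCast]
            exact (pvSlice_eq_iff _ _ i j 6 hi6 hj6).mpr hpt
    by_cases hG : 6 ≤ pvG word.toList predict_word.toList
    · rw [hiff.mpr hG]
      simp [hG]
    · have hne : ¬ (pvG word.toList predict_word.toList =
          min word.toList.length predict_word.toList.length) := by omega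
      rw [Bool.eq_false_iff.mpr (fun hh => hG (hiff.mp hh))]
      simp [hG]
      simpa [String.length_toList] using hne

-- ===== VERDICT (by name: the statement is the Claim_ definition above) =====
theorem judge_same_word_spec : Claim_equal_judge_same_word := by
  intro word predict_word _
  unfold Spec_judge_same_word
  rw [portA_eq, portB_eq]
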